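-- pv_equiv track=rewrite | github.com/sudhanthiran/Python_Practice | Competitive Coding/Code1.py | maxOnes
-- ===== SOURCE A (Python) =====
-- def maxOnes(list):
--     if(len(list)==1):
--         return 0
--     else:
--         max_sum =0
--         a=[]
--         for count,ele in enumerate(list):
--             temp = sum(ele)
--             if(temp >= max_sum):
--                 max_sum=temp
--                 a.append(calc_max_ones(ele))
--             else:
--                 a.append(0)
--         return a.index(max(a))
--
-- def calc_max_ones(list):
--     count_one =0
--     for i in list:
--         if i == 0:
--             break
--         else:
--             count_one = count_one + 1
--     return count_one
-- ===== SOURCE B (Python) =====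
-- def first_zero_index(row):
--     return next((k for k, v in enumerate(row) if v == 0), len(row))
--
-- def maxOnes(list):
--     # Stateless/declarative: a row scores its leading-nonzero run iff its sum is
--     # >= 0 and >= every earlier row's sum; answer is the first argmax of scores.
--     if len(list) == 1:
--         return 0
--     sums = [sum(row) for row in list]
--     scores = [first_zero_index(row) if s >= 0 and all(t <= s for t in sums[:i]) else 0
--               for i, (s, row) in enumerate(zip(sums, list))]
--     return max(range(len(scores)), key=scores.__getitem__)
-- ===== Notes on version B (the rewrite author's own statement) =====
-- stated objective: alternative
-- what changed: B replaces A's stateful running-max loop that appends scores and then scans them twice (max() then .index()) by a stateless staged construction: a table of row sums, a comprehension scoring each row by the declarative condition 'its sum is >= 0 and >= every earlier row sum' (leading-ones via index-of-first-zero over enumerate), and a single idiomatic first-occurrence argmax max(range(n), key=scores.__getitem__).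
-- outside the precondition, e.g. on maxOnes([]): A raises ValueError, B raises ValueError
import Mathlib
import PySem

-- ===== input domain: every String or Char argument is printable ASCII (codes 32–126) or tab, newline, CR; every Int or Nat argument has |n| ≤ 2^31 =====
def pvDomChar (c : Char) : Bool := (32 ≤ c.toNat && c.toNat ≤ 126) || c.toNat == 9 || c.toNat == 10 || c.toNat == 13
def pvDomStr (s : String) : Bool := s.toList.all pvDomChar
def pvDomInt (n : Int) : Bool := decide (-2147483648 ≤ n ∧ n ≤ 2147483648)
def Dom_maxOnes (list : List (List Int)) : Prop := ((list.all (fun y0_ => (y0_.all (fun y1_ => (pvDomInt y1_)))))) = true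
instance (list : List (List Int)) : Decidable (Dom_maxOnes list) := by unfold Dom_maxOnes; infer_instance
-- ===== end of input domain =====

-- B is a stateless staged reformulation of A (sums table + declarative per-row condition +
-- first-occurrence argmax over indices); objective: alternative (quadratic in rows, no state).
-- On the empty list A's max([]) raises ValueError (B's max(range(0)) raises too) — excluded by Pre_.

-- ===== PORT A =====
-- calc_max_ones: loop with break at the first 0 → structural recursion
def calcMaxOnes : List Int → Int
  | [] => 0
  | x :: xs => if x = 0 then 0 else calcMaxOnes xs + 1

-- one iteration of A's for-loop over (max_sum, a)
def stepA (st : Int × List Int) (ele : List Int) : Int × List Int :=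
  let temp := ele.sum
  if temp ≥ st.1 then (temp, st.2 ++ [calcMaxOnes ele]) else (st.1, st.2 ++ [(0 : Int)])

def maxOnes (list : List (List Int)) : Int :=
  if list.length == 1 then 0
  else
    let st := list.foldl stepA (0, ([] : List Int))
    match PySem.List.max? st.2 (fun y => y) with
    | some m =>
      match PySem.List.index? st.2 m with
      | some k => (k : Int)
      | none => 0          -- unreachable: max(a) is an element of a
    | none => 0            -- Python raises ValueError here (a = [] ↔ list = []); excluded by Pre_

-- ===== PORT B =====
-- next((k for k, v in enumerate(row) if v == 0), len(row))
def firstZeroIdx (row : List Int) : Int :=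
  ((((PySem.List.enumerate row 0).find? (fun p => p.2 == 0)).map (fun p => p.1)).getD
    (row.length : Int))

def maxOnes_alt (list : List (List Int)) : Int :=
  if list.length == 1 then 0
  else
    let sums := list.map (fun row => row.sum)
    let scores := (PySem.List.enumerate (sums.zip list) 0).map (fun p =>
      if 0 ≤ p.2.1 ∧ (∀ t ∈ PySem.List.slice sums none (some p.1), t ≤ p.2.1)
      then firstZeroIdx p.2.2 else 0)
    -- max(range(len(scores)), key=scores.__getitem__); raises on scores = [] (excluded by Pre_)
    (PySem.List.max? (PySem.List.pyRange 0 (scores.length : Int) 1)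
      (fun i => PySem.List.pyGetD scores i 0)).getD 0

-- ===== PRECONDITION & SPEC =====
-- Pre_ excludes only the empty list, on which both A's max([]) and B's max(range(0)) raise ValueError.
def Pre_maxOnes (list : List (List Int)) : Prop := list ≠ []
instance (list : List (List Int)) : Decidable (Pre_maxOnes list) := by unfold Pre_maxOnes; infer_instance
def pvWitness_maxOnes : List (List Int) := [[1, 1, 0], [1, 0, 1]]

def Spec_maxOnes (list : List (List Int)) (out : Int) : Prop := out = maxOnes_alt list
instance (list : List (List Int)) (out : Int) : Decidable (Spec_maxOnes list out) := by unfold Spec_maxOnes; infer_instance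

-- ===== CLAIM (what is proved, stated in full; the proofs are below) =====
def Claim_equal_maxOnes : Prop := ∀ (list : List (List Int)), Dom_maxOnes list → Pre_maxOnes list → Spec_maxOnes list (maxOnes list)

-- ===== LEMMAS AND PROOFS =====

-- B's index-of-first-zero equals A's leading-nonzero counter
lemma fzAux (xs : List Int) : ∀ (s : Int),
    ((((PySem.List.enumerate xs s).find? (fun p => p.2 == 0)).map (fun p => p.1)).getD
      (s + (xs.length : Int))) = s + calcMaxOnes xs := by
  induction xs with
  | nil => intro s; simp [PySem.List.enumerate_nil, calcMaxOnes]
  | cons x xs ih =>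
    intro s
    rw [PySem.List.enumerate_cons, List.find?_cons]
    by_cases hx : x = 0
    · simp [hx, calcMaxOnes]
    · have hb : ((s, x).2 == (0 : Int)) = false := by simpa using hx
      rw [hb]
      have := ih (s + 1)
      have hlen : s + ((x :: xs).length : Int) = (s + 1) + (xs.length : Int) := by
        push_cast [List.length_cons]; ring
      rw [hlen, this]
      simp [calcMaxOnes, hx]; ring

lemma fz_eq_calc (row : List Int) : firstZeroIdx row = calcMaxOnes row := by
  have := fzAux row 0
  simpa [firstZeroIdx] using this

-- the score list A builds, as a standalone recursion
def scoresFrom : Int → List (List Int) → List Int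
  | _, [] => []
  | ms, r :: rs => (if r.sum ≥ ms then calcMaxOnes r else 0) :: scoresFrom (max ms r.sum) rs

lemma foldA_eq (rows : List (List Int)) : ∀ (ms : Int) (a : List Int),
    rows.foldl stepA (ms, a) = ((rows.map List.sum).foldl max ms, a ++ scoresFrom ms rows) := by
  induction rows with
  | nil => intro ms a; simp [scoresFrom]
  | cons r rs ih =>
    intro ms a
    by_cases hc : r.sum ≥ ms
    · simp [stepA, hc, ih, scoresFrom]
    · have hmax : max ms r.sum = ms := max_eq_left (by omega)
      simp [stepA, hc, ih, scoresFrom, hmax]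

lemma length_scoresFrom (rows : List (List Int)) : ∀ ms, (scoresFrom ms rows).length = rows.length := by
  induction rows with
  | nil => intro _; simp [scoresFrom]
  | cons r rs ih => intro ms; simp [scoresFrom, ih]

lemma scoresFrom_getElem (rows : List (List Int)) : ∀ (i : Nat) (ms : Int)
    (h : i < rows.length),
    (scoresFrom ms rows)[i]'(by rw [length_scoresFrom]; exact h) =
      if ((rows.take i).map List.sum).foldl max ms ≤ (rows[i]).sum
      then calcMaxOnes rows[i] else 0 := by
  induction rows with
  | nil => intro i ms h; simp at h
  | cons r rs ih =>
    intro i ms h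
    cases i with
    | zero => simp [scoresFrom, ge_iff_le]
    | succ i =>
      have h' : i < rs.length := by simpa using h
      simpa [scoresFrom, List.take_succ_cons] using ih i (max ms r.sum) h'

lemma foldl_max_le_iff (l : List Int) : ∀ (a s : Int),
    l.foldl max a ≤ s ↔ a ≤ s ∧ ∀ t ∈ l, t ≤ s := by
  induction l with
  | nil => intro a s; simp
  | cons x l ih =>
    intro a s
    rw [List.foldl_cons, ih, max_le_iff]
    constructor
    · rintro ⟨⟨h1, h2⟩, h3⟩
      exact ⟨h1, by intro t ht; rcases List.mem_cons.mp ht with rfl | ht' <;> [exact h2; exact h3 t ht']⟩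
    · rintro ⟨h1, h2⟩
      exact ⟨⟨h1, h2 x (List.mem_cons_self)⟩, fun t ht => h2 t (List.mem_cons_of_mem _ ht)⟩

-- B's comprehension produces exactly A's score list
lemma bscores_eq (list : List (List Int)) :
    ((PySem.List.enumerate ((list.map (fun row => row.sum)).zip list) 0).map (fun p =>
      if 0 ≤ p.2.1 ∧ (∀ t ∈ PySem.List.slice (list.map (fun row => row.sum)) none (some p.1), t ≤ p.2.1)
      then firstZeroIdx p.2.2 else 0)) = scoresFrom 0 list := by
  apply List.ext_getElem
  · simp [PySem.List.length_enumerate, length_scoresFrom]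
  · intro i h1 h2
    have hi : i < list.length := by
      simpa [PySem.List.length_enumerate] using h1
    rw [List.getElem_map, PySem.List.getElem_enumerate]
    rw [scoresFrom_getElem list i 0 hi]
    have hzip : ((list.map (fun row => row.sum)).zip list)[i]'(by simpa using hi) =
        ((list[i]).sum, list[i]) := by
      simp [List.getElem_zip]
    rw [hzip]
    have hslice : PySem.List.slice (list.map (fun row => row.sum)) none (some ((0 : Int) + (i : Int)))
        = (list.take i).map List.sum := by
      have h0 : ((0 : Int) + (i : Int)) = ((i : Nat) : Int) := by ring
      rw [h0, PySem.List.slice_to_natCast, List.map_take]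
    rw [hslice]
    have hcond : (0 ≤ (list[i]).sum ∧ ∀ t ∈ (list.take i).map List.sum, t ≤ (list[i]).sum)
        ↔ ((list.take i).map List.sum).foldl max 0 ≤ (list[i]).sum :=
      (foldl_max_le_iff _ 0 _).symm
    simp only [hcond, fz_eq_calc]

-- invariant of the argmax fold over range(len(xs)): the accumulator is the first argmax of the prefix
lemma argmax_loop (xs : List Int) (f : Option Int → Int → Option Int)
    (hf : ∀ (a x : Int), f (some a) x =
      if PySem.List.pyGetD xs a 0 < PySem.List.pyGetD xs x 0 then some x else some a)
    (d : Nat) : ∀ (j b : Nat), (hj : j + d = xs.length) →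
    (hb : b < xs.length) →
    (∀ k (hk : k < j), xs[k]'(by omega) ≤ xs[b]) → (∀ k (hk : k < b), xs[k]'(by omega) < xs[b]) →
    ∃ c : Nat, ∃ hc : c < xs.length,
      (PySem.List.pyRange (j : Int) (xs.length : Int) 1).foldl f (some (b : Int)) = some (c : Int) ∧
      (∀ k (hk : k < xs.length), xs[k] ≤ xs[c]) ∧ (∀ k (hk : k < c), xs[k]'(by omega) < xs[c]) := by
  induction d with
  | zero =>
    intro j b hj hb hmax hfirst
    have hnil : PySem.List.pyRange (j : Int) (xs.length : Int) 1 = [] :=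
      PySem.List.pyRange_one_eq_nil (by omega)
    refine ⟨b, hb, ?_, ?_, hfirst⟩
    · rw [hnil]; rfl
    · intro k hk; exact hmax k (by omega)
  | succ d ih =>
    intro j b hj hb hmax hfirst
    have hjlt : j < xs.length := by omega
    have hcons := PySem.List.pyRange_one_cons (a := (j : Int)) (b := (xs.length : Int)) (by exact_mod_cast hjlt)
    rw [hcons, List.foldl_cons, hf]
    have hkeyb : PySem.List.pyGetD xs ((b : Nat) : Int) 0 = xs[b] := by
      rw [PySem.List.pyGetD_natCast, List.getD_eq_getElem _ _ hb]
    have hkeyj : PySem.List.pyGetD xs ((j : Nat) : Int) 0 = xs[j] := by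
      rw [PySem.List.pyGetD_natCast, List.getD_eq_getElem _ _ hjlt]
    rw [hkeyb, hkeyj]
    have hstep : ((j : Int) + 1) = (((j + 1 : Nat)) : Int) := by push_cast; ring
    by_cases hlt : xs[b] < xs[j]
    · rw [if_pos hlt, hstep]
      exact ih (j + 1) j (by omega) hjlt
        (fun k hk => by
          rcases Nat.lt_succ_iff_lt_or_eq.mp hk with hk' | rfl
          · exact le_of_lt (lt_of_le_of_lt (hmax k hk') hlt)
          · exact le_refl _)
        (fun k hk => lt_of_le_of_lt (hmax k hk) hlt)
    · rw [if_neg hlt, hstep]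
      exact ih (j + 1) b (by omega) hb
        (fun k hk => by
          rcases Nat.lt_succ_iff_lt_or_eq.mp hk with hk' | rfl
          · exact hmax k hk'
          · omega)
        hfirst

-- ===== VERDICT (by name: the statement is the Claim_ definition above) =====
theorem maxOnes_spec : Claim_equal_maxOnes := by
  intro list _ hpre
  unfold Spec_maxOnes maxOnes maxOnes_alt
  by_cases h1 : list.length = 1
  · simp [h1]
  · have h1' : (list.length == 1) = false := by simpa using h1
    simp only [h1', Bool.false_eq_true, if_false]
    rw [foldA_eq list 0 [], bscores_eq list]
    simp only [List.nil_append]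
    set xs : List Int := scoresFrom 0 list with hxs
    have hlen : xs.length = list.length := length_scoresFrom list 0
    have hne : xs ≠ [] := by
      intro hnil
      exact hpre (List.length_eq_zero_iff.mp (by rw [← hlen, hnil]; rfl))
    have hpos : 0 < xs.length := List.length_pos_iff.mpr hne
    -- B's side: capture max?'s fold function and run the argmax invariant
    obtain ⟨F, hF1, hF0, hFs⟩ :
        ∃ F : Option Int → Int → Option Int,
          (∀ (l : List Int), PySem.List.max? l (fun i => PySem.List.pyGetD xs i 0) = l.foldl F none) ∧
          (∀ x : Int, F none x = some x) ∧
          (∀ (a x : Int), F (some a) x =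
            if PySem.List.pyGetD xs a 0 < PySem.List.pyGetD xs x 0 then some x else some a) :=
      ⟨_, fun l => rfl, fun x => rfl, fun a x => rfl⟩
    have h01 := PySem.List.pyRange_one_cons (a := (0 : Int)) (b := (xs.length : Int)) (by exact_mod_cast hpos)
    obtain ⟨c, hc, hfold, hmaxc, hfirstc⟩ :=
      argmax_loop xs F hFs (xs.length - 1) 1 0 (by omega) hpos
        (fun k hk => by interval_cases k; exact le_refl _)
        (fun k hk => by omega)
    -- A's side
    obtain ⟨x, t, hx⟩ := List.exists_cons_of_ne_nil hne
    have hmaxA : PySem.List.max? xs (fun y => y) = some (t.foldl max x) := by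
      rw [hx]; exact PySem.List.max?_id_cons (x := x) (t := t)
    set m : Int := t.foldl max x with hm
    have hmmem : m ∈ xs := PySem.List.max?_mem hmaxA
    have hmisMax : ∀ y ∈ xs, y ≤ m := by
      intro y hy; simpa using PySem.List.max?_isMax hmaxA y hy
    obtain ⟨k, hk⟩ := Option.isSome_iff_exists.mp ((PySem.List.index?_isSome_iff xs m).mpr hmmem)
    obtain ⟨hklt, hxk, hkfirst⟩ := PySem.List.getElem_of_index?_eq_some hk
    -- xs[c] = m
    have hc1 : xs[c] ≤ m := hmisMax _ (List.getElem_mem hc)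
    have hc2 : m ≤ xs[c] := by
      obtain ⟨i, hi, hieq⟩ := List.mem_iff_getElem.mp hmmem
      rw [← hieq]; exact hmaxc i hi
    have hcm : xs[c] = m := le_antisymm hc1 hc2
    -- k = c
    have hkc : k = c := by
      rcases lt_trichotomy k c with hlt | heq | hgt
      · have hlt' := hfirstc k hlt
        rw [hxk, hcm] at hlt'
        exact absurd hlt' (lt_irrefl m)
      · exact heq
      · exact absurd hcm (hkfirst c hgt)
    rw [hmaxA]
    simp only [hk]
    -- B's expression
    rw [hF1, h01, List.foldl_cons, hF0]
    rw [show ((0 : Int) : Int) = (((0 : Nat)) : Int) by norm_num,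
        show ((((0 : Nat)) : Int) + 1) = (((1 : Nat)) : Int) by norm_num, hfold]
    simp [hkc]
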